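-- pv_equiv track=rewrite | github.com/moshloop/ansible-deploy | filter_plugins/play_groups.py | play_groups
-- ===== SOURCE A (Python) =====
-- def play_groups(play_hosts, groups, hostvars, exclude=[]):
--     _list = []
--
--     for host in play_hosts:
--         for group in groups:
--             if group in exclude:
--                 continue
--             if host in groups[group]:
--                 _list.append(group)
--     return list(set(_list))
-- ===== SOURCE B (Python) =====
-- def play_groups(play_hosts, groups, hostvars, exclude=[]):
--     # inverted index: host -> set of (non-excluded) groups containing it
--     index = {}
--     for group, members in groups.items():
--         if group in exclude:
--             continue
--         for member in members:
--             index.setdefault(member, set()).add(group)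
--     result = set()
--     for host in play_hosts:
--         result |= index.get(host, set())
--     return list(result)
-- ===== Notes on version B (the rewrite author's own statement) =====
-- stated objective: faster
-- what changed: B builds an inverted index (host -> set of non-excluded groups containing it) in one pass over group memberships, then unions index entries over play_hosts, instead of rescanning every group's member list for every play host.
import Mathlib
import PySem

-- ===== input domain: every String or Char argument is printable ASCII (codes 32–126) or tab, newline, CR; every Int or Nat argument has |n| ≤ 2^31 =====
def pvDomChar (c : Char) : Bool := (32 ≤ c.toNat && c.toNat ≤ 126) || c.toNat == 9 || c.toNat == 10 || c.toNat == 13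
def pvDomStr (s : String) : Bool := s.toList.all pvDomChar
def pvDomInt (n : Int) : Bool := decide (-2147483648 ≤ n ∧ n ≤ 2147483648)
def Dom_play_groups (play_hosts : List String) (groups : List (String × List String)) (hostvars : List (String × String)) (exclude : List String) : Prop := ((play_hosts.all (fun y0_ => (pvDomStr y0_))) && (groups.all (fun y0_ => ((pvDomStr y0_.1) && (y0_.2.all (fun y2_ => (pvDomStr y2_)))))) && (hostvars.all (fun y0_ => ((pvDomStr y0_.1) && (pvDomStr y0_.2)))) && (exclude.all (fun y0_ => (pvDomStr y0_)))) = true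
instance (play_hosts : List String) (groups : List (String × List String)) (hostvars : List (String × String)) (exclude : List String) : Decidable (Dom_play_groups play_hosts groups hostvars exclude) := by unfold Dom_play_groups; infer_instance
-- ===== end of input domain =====

-- ===== PORT A =====
-- B replaces A's rescan of every group per host by an inverted host->groups index (objective: faster).
-- A returns list(set(...)): set iteration order is not modelled; both ports return the set in first-insertion order,
-- and the return value is compared as a set.
def play_groups (play_hosts : List String) (groups : List (String × List String)) (hostvars : List (String × String)) (exclude : List String) : List String :=
  let gd := PySem.Dict.ofList groups
  let _list := play_hosts.foldl (fun acc host =>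
    gd.items.foldl (fun acc2 p =>
      if exclude.contains p.1 then acc2
      else if p.2.contains host then acc2 ++ [p.1] else acc2) acc) []
  PySem.Set.ofList _list

-- ===== PORT B =====
def play_groups_alt (play_hosts : List String) (groups : List (String × List String)) (hostvars : List (String × String)) (exclude : List String) : List String :=
  let gd := PySem.Dict.ofList groups
  let index := gd.items.foldl (fun idx p =>
    if exclude.contains p.1 then idx
    else p.2.foldl (fun idx2 member =>
      idx2.insert member (PySem.Set.add (idx2.getD member PySem.Set.empty) p.1)) idx)
    (PySem.Dict.empty : PySem.Dict String (PySem.Set String))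
  play_hosts.foldl (fun result host =>
    PySem.Set.update result (index.getD host PySem.Set.empty)) PySem.Set.empty

-- ===== PRECONDITION & SPEC =====
def Spec_play_groups (play_hosts : List String) (groups : List (String × List String)) (hostvars : List (String × String)) (exclude : List String) (out : List String) : Prop := out = play_groups_alt play_hosts groups hostvars exclude
instance (play_hosts : List String) (groups : List (String × List String)) (hostvars : List (String × String)) (exclude : List String) (out : List String) : Decidable (Spec_play_groups play_hosts groups hostvars exclude out) := by unfold Spec_play_groups; infer_instance

-- ===== CLAIM (what is proved, stated in full; the proofs are below) =====
def Claim_equal_play_groups : Prop := ∀ (play_hosts : List String) (groups : List (String × List String)) (hostvars : List (String × String)) (exclude : List String), Dom_play_groups play_hosts groups hostvars exclude → Spec_play_groups play_hosts groups hostvars exclude (play_groups play_hosts groups hostvars exclude)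

-- ===== LEMMAS AND PROOFS =====

-- the groups (in dict order) that are not excluded and contain `host`
def pvHits (items : List (String × List String)) (exclude : List String) (host : String) : List String :=
  (items.filter (fun p => !exclude.contains p.1 && p.2.contains host)).map (·.1)

-- A's inner loop appends exactly the hit list of `host`
theorem pv_innerA (items : List (String × List String)) (exclude : List String) (host : String) (acc : List String) :
    items.foldl (fun acc2 p =>
      if exclude.contains p.1 then acc2
      else if p.2.contains host then acc2 ++ [p.1] else acc2) acc
    = acc ++ pvHits items exclude host := by
  induction items generalizing acc with
  | nil => simp [pvHits]
  | cons p rest ih =>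
    simp only [List.foldl_cons, pvHits, List.filter_cons]
    by_cases hex : p.1 ∈ exclude
    · rw [if_pos (by simpa using hex), ih]
      simp [pvHits, hex]
    · rw [if_neg (by simpa using hex)]
      by_cases hm : host ∈ p.2
      · rw [if_pos (by simpa using hm), ih]
        simp [pvHits, hex, hm]
      · rw [if_neg (by simpa using hm), ih]
        simp [pvHits, hex, hm]

-- B's member loop: the entry of h gains g exactly when h is a member
theorem pv_memberFold (ms : List String) (g : String) (idx : PySem.Dict String (PySem.Set String)) (h : String) :
    (ms.foldl (fun i m => i.insert m (PySem.Set.add (i.getD m PySem.Set.empty) g)) idx).getD h PySem.Set.empty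
    = if h ∈ ms then PySem.Set.add (idx.getD h PySem.Set.empty) g else idx.getD h PySem.Set.empty := by
  induction ms generalizing idx with
  | nil => simp
  | cons m rest ih =>
    simp only [List.foldl_cons, ih, List.mem_cons, PySem.Dict.getD_insert]
    by_cases hrest : h ∈ rest <;> by_cases hm : h = m <;>
      simp [hrest, hm]

-- B's index-building loop computes the hit list at every host
theorem pv_indexFold (items : List (String × List String)) (exclude : List String)
    (idx : PySem.Dict String (PySem.Set String))
    (hnd : (items.map (·.1)).Nodup)
    (hfresh : ∀ p ∈ items, ∀ h, p.1 ∉ idx.getD h PySem.Set.empty) (h : String) :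
    (items.foldl (fun idx p =>
      if exclude.contains p.1 then idx
      else p.2.foldl (fun idx2 member =>
        idx2.insert member (PySem.Set.add (idx2.getD member PySem.Set.empty) p.1)) idx) idx).getD h PySem.Set.empty
    = idx.getD h PySem.Set.empty ++ pvHits items exclude h := by
  induction items generalizing idx with
  | nil => simp [pvHits]
  | cons p rest ih =>
    simp only [List.map_cons, List.nodup_cons] at hnd
    simp only [List.foldl_cons]
    by_cases hex : p.1 ∈ exclude
    · rw [if_pos (by simpa using hex), ih _ hnd.2 (fun q hq h' => hfresh q (List.mem_cons_of_mem _ hq) h')]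
      simp [pvHits, hex]
    · rw [if_neg (by simpa using hex)]
      have hfr := hfresh p (List.mem_cons_self ..)
      have hstep : ∀ h', (p.2.foldl (fun i m => i.insert m (PySem.Set.add (i.getD m PySem.Set.empty) p.1)) idx).getD h' PySem.Set.empty
          = if h' ∈ p.2 then idx.getD h' PySem.Set.empty ++ [p.1] else idx.getD h' PySem.Set.empty := by
        intro h'
        rw [pv_memberFold]
        by_cases hm : h' ∈ p.2
        · rw [if_pos hm, if_pos hm, PySem.Set.add_of_not_mem (hfr h')]
        · rw [if_neg hm, if_neg hm]
      rw [ih _ hnd.2]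
      · rw [hstep]
        simp only [pvHits, List.filter_cons]
        by_cases hm : h ∈ p.2
        · simp [hm, hex, List.append_assoc]
        · simp [hm, hex]
      · intro q hq h'
        rw [hstep h']
        have hq1 : q.1 ∉ idx.getD h' PySem.Set.empty := hfresh q (List.mem_cons_of_mem _ hq) h'
        have hqne : q.1 ≠ p.1 := fun he => hnd.1 (he ▸ List.mem_map_of_mem hq)
        by_cases hm : h' ∈ p.2
        · rw [if_pos hm]
          intro hx
          rcases List.mem_append.mp hx with hx | hx
          · exact hq1 hx
          · exact hqne (List.mem_singleton.mp hx)
        · rw [if_neg hm]; exact hq1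

-- folding Set.update over the hosts is folding Set.add over the concatenation of the looked-up lists
theorem pv_updateFold (hs : List String) (f : String → List String) (r : PySem.Set String) :
    hs.foldl (fun r h => PySem.Set.update r (f h)) r
    = (hs.flatMap f).foldl PySem.Set.add r := by
  induction hs generalizing r with
  | nil => simp
  | cons h rest ih =>
    rw [List.foldl_cons, ih, List.flatMap_cons, List.foldl_append]
    rfl

-- ===== VERDICT (by name: the statement is the Claim_ definition above) =====
theorem play_groups_spec : Claim_equal_play_groups := by
  intro play_hosts groups hostvars exclude hdom
  clear hdom
  unfold Spec_play_groups play_groups play_groups_alt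
  simp only
  have hnd : (((PySem.Dict.ofList groups).items).map (·.1)).Nodup := by
    have := PySem.Dict.nodup_keys_ofList (κ := String) (ν := List String) groups
    simpa [PySem.Dict.keys] using this
  have hidx : ∀ h, (((PySem.Dict.ofList groups).items).foldl (fun idx p =>
      if exclude.contains p.1 then idx
      else p.2.foldl (fun idx2 member =>
        idx2.insert member (PySem.Set.add (idx2.getD member PySem.Set.empty) p.1)) idx)
      (PySem.Dict.empty : PySem.Dict String (PySem.Set String))).getD h PySem.Set.empty
      = pvHits ((PySem.Dict.ofList groups).items) exclude h := by
    intro h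
    rw [pv_indexFold _ exclude _ hnd (by simp [PySem.Dict.getD_empty]) h]
    simp [PySem.Dict.getD_empty]
  have hA : ∀ acc, play_hosts.foldl (fun acc host =>
      ((PySem.Dict.ofList groups).items).foldl (fun acc2 p =>
        if exclude.contains p.1 then acc2
        else if p.2.contains host then acc2 ++ [p.1] else acc2) acc) acc
      = acc ++ play_hosts.flatMap (pvHits ((PySem.Dict.ofList groups).items) exclude) := by
    intro acc
    induction play_hosts generalizing acc with
    | nil => simp
    | cons h rest ih =>
      rw [List.foldl_cons, pv_innerA, ih, List.flatMap_cons, List.append_assoc]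
  rw [hA]
  simp only [hidx]
  rw [pv_updateFold]
  rw [PySem.Set.ofList_eq_foldl]
  simp [PySem.Set.empty]
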